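-- pv_equiv track=rewrite | github.com/IcyGuy18/ProtLog | server/sequence_highlighter.py | highlight_sequence
-- ===== SOURCE A (Python) =====
-- def highlight_sequence(sequence: str):
--     splits = [
--         sequence[i:i + 10] for i in range(0, len(sequence), 10)
--     ]
--     response: list[tuple[str, int, int]] = []
--     total: int = 0
--     for i in range(len(splits)):
--         response.append((splits[i], total, len(splits[i])))
--         total += len(splits[i])
--     return response
-- ===== SOURCE B (Python) =====
-- def highlight_sequence(sequence: str):
--     out = []
--     i = 0
--     n = len(sequence)
--     while i < n:
--         head = sequence[i:i + 10]
--         out.append((head, i, len(head)))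
--         i += 10
--     return out
-- ===== Notes on version B (the rewrite author's own statement) =====
-- stated objective: simpler
-- what changed: Single fused while-loop over the start index i emitting (sequence[i:i+10], i, len(chunk)) directly, using i itself as the offset; A's precomputed splits list, second index loop and running total accumulator are eliminated (correct because every non-final chunk has length exactly 10, so the accumulated total equals i).
import Mathlib
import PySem

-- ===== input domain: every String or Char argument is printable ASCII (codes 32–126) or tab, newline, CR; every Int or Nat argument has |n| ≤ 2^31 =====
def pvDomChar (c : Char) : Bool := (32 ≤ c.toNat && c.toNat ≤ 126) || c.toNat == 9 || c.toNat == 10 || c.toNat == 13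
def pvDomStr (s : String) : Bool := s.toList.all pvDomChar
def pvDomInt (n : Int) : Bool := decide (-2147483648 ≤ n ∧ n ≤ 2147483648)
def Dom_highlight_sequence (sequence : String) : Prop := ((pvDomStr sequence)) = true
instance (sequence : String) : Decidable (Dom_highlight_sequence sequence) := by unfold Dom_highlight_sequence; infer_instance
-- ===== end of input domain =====

-- B fuses everything into one while-loop over the start index i, emitting (chunk, i, len(chunk))
-- directly; A's splits list, second index loop and running total are gone (offset = i).

-- ===== PORT A =====
def highlight_sequence (sequence : String) : List (String × Int × Int) :=
  -- splits = [sequence[i:i+10] for i in range(0, len(sequence), 10)]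
  let splits : List String :=
    (PySem.List.pyRange 0 (PySem.Str.len sequence) 10).map
      (fun i => PySem.Str.slice sequence (some i) (some (i + 10)))
  -- for i in range(len(splits)): response.append((splits[i], total, len(splits[i]))); total += len(splits[i])
  let res :=
    (PySem.List.pyRange 0 (PySem.List.len splits) 1).foldl
      (fun (st : List (String × Int × Int) × Int) i =>
        let c := PySem.List.pyGetD splits i ""
        (st.1 ++ [(c, st.2, PySem.Str.len c)], st.2 + PySem.Str.len c))
      ([], 0)
  res.1

-- ===== PORT B =====
-- while i < n: head = sequence[i:i+10]; out.append((head, i, len(head))); i += 10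
-- (head = Str.slice on the char list, i.e. String.ofList of the list slice — exact for these bounds)
def pvLoopB (cs : List Char) (i : Int) : List (String × Int × Int) :=
  if h : i < (cs.length : Int) then
    let head := PySem.List.slice cs (some i) (some (i + 10))
    (String.ofList head, i, (head.length : Int)) :: pvLoopB cs (i + 10)
  else []
termination_by ((cs.length : Int) - i).toNat
decreasing_by omega

def highlight_sequence_alt (sequence : String) : List (String × Int × Int) :=
  pvLoopB sequence.toList 0

-- ===== PRECONDITION & SPEC =====
def Spec_highlight_sequence (sequence : String) (out : List (String × Int × Int)) : Prop := out = highlight_sequence_alt sequence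
instance (sequence : String) (out : List (String × Int × Int)) : Decidable (Spec_highlight_sequence sequence out) := by unfold Spec_highlight_sequence; infer_instance

-- ===== CLAIM (what is proved, stated in full; the proofs are below) =====
def Claim_equal_highlight_sequence : Prop := ∀ (sequence : String), Dom_highlight_sequence sequence → Spec_highlight_sequence sequence (highlight_sequence sequence)

-- ===== LEMMAS AND PROOFS =====

-- common reference form: peel the first 10 characters, carry the offset
def pvGoB (cs : List Char) (offset : Int) : List (String × Int × Int) :=
  if cs = [] then []
  else
    let head := cs.take 10
    (String.ofList head, offset, (head.length : Int)) :: pvGoB (cs.drop 10) (offset + head.length)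
termination_by cs.length
decreasing_by
  have : cs.length ≠ 0 := by simpa using ‹¬cs = []›
  simp [List.length_drop]; omega

-- A's splits, as a function of the character list
def pvSplitsOf (cs : List Char) : List String :=
  (PySem.List.pyRange 0 (cs.length : Int) 10).map
    (fun i => String.ofList (PySem.List.slice cs (some i) (some (i + 10))))

-- unfused form of A's second loop
def pvEmit (L : List String) (t : Int) : List (String × Int × Int) :=
  match L with
  | [] => []
  | c :: L' => (c, t, PySem.Str.len c) :: pvEmit L' (t + PySem.Str.len c)

lemma pvFoldA_emit (L : List String) (acc : List (String × Int × Int)) (t : Int) :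
    (L.foldl
      (fun (st : List (String × Int × Int) × Int) c =>
        (st.1 ++ [(c, st.2, PySem.Str.len c)], st.2 + PySem.Str.len c))
      (acc, t)).1 = acc ++ pvEmit L t := by
  induction L generalizing acc t with
  | nil => simp [pvEmit]
  | cons c L' ih =>
    simp only [List.foldl_cons, pvEmit]
    rw [ih]
    simp

lemma pvSlice_ten (cs : List Char) (k : Nat) :
    PySem.List.slice cs (some ((0 : Int) + 10 * (k : Int)))
      (some ((0 : Int) + 10 * (k : Int) + 10)) = (cs.drop (10 * k)).take 10 := by
  have h := PySem.List.slice_natCast_add cs (10 * k) 10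
  push_cast at h
  simpa using h

lemma pvSplitsOf_cons (cs : List Char) (h : cs ≠ []) :
    pvSplitsOf cs = String.ofList (cs.take 10) :: pvSplitsOf (cs.drop 10) := by
  have hlen : 0 < cs.length := List.length_pos_of_ne_nil h
  unfold pvSplitsOf
  rw [PySem.List.pyRange_of_pos 0 (cs.length : Int) (by norm_num),
      PySem.List.pyRange_of_pos 0 ((cs.drop 10).length : Int) (by norm_num)]
  have hM : (if (0 : Int) < (cs.length : Int) then ((((cs.length : Int)) - 0 + 10 - 1) / 10).toNat else 0)
      = (if (0 : Int) < ((cs.drop 10).length : Int) then ((((cs.drop 10).length : Int) - 0 + 10 - 1) / 10).toNat else 0) + 1 := by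
    rw [List.length_drop]
    split_ifs <;> omega
  rw [hM, List.range_succ_eq_map]
  simp only [List.map_cons, List.map_map]
  congr 1
  · rw [pvSlice_ten cs 0]
    simp
  · apply List.map_congr_left
    intro k _
    simp only [Function.comp]
    rw [pvSlice_ten cs (k + 1)]
    rw [pvSlice_ten (cs.drop 10) k]
    simp [List.drop_drop, Nat.mul_succ, Nat.add_comm]

lemma pvEmit_splits (n : Nat) : ∀ (cs : List Char), cs.length ≤ n → ∀ (off : Int),
    pvEmit (pvSplitsOf cs) off = pvGoB cs off := by
  induction n with
  | zero =>
    intro cs hcs off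
    have : cs = [] := List.eq_nil_of_length_eq_zero (by omega)
    subst this
    rw [pvGoB]
    simp [pvSplitsOf, PySem.List.pyRange_of_pos 0 0 (by norm_num : (0:Int) < 10), pvEmit]
  | succ n ih =>
    intro cs hcs off
    by_cases h : cs = []
    · subst h
      rw [pvGoB]
      simp [pvSplitsOf, PySem.List.pyRange_of_pos 0 0 (by norm_num : (0:Int) < 10), pvEmit]
    · rw [pvSplitsOf_cons cs h, pvGoB]
      simp only [h, ite_false]
      rw [pvEmit]
      have hlen : 0 < cs.length := List.length_pos_of_ne_nil h
      have hdrop : (cs.drop 10).length ≤ n := by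
        rw [List.length_drop]; omega
      have hl : PySem.Str.len (String.ofList (cs.take 10)) = ((cs.take 10).length : Int) := by
        simp [PySem.Str.len]
      rw [hl, ih (cs.drop 10) hdrop]

lemma pvLoopB_goB (n : Nat) : ∀ (cs : List Char) (i : Int), 0 ≤ i →
    cs.length - i.toNat ≤ n → pvLoopB cs i = pvGoB (cs.drop i.toNat) i := by
  induction n with
  | zero =>
    intro cs i hi hn
    have hge : ¬ i < (cs.length : Int) := by omega
    rw [pvLoopB]
    simp only [hge, dite_false]
    have : cs.drop i.toNat = [] := by
      apply List.drop_eq_nil_of_le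
      omega
    rw [this, pvGoB]
    simp
  | succ n ih =>
    intro cs i hi hn
    by_cases hlt : i < (cs.length : Int)
    case neg =>
      rw [pvLoopB, dif_neg hlt]
      have : cs.drop i.toNat = [] := List.drop_eq_nil_of_le (by omega)
      rw [this, pvGoB]
      simp
    case pos =>
      rw [pvLoopB]
      simp only [hlt, dite_true]
      have hsl : PySem.List.slice cs (some i) (some (i + 10)) = (cs.drop i.toNat).take 10 := by
        rw [PySem.List.slice_toNat cs hi (by omega : (0:Int) ≤ i + 10)]
        congr 1
        omega
      have hne : cs.drop i.toNat ≠ [] := by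
        intro hc
        have := List.drop_eq_nil_iff.mp hc
        omega
      rw [pvGoB]
      simp only [hne, ite_false, hsl]
      congr 1
      by_cases hend : (cs.length : Int) ≤ i + 10
      · -- last chunk: both recursive calls are empty
        have h1 : pvLoopB cs (i + 10) = [] := by
          rw [pvLoopB]
          simp only []
          rw [dif_neg (by omega)]
        have h2 : ((cs.drop i.toNat).take 10).length = cs.length - i.toNat := by
          simp; omega
        have h3 : (cs.drop i.toNat).drop 10 = [] := by
          apply List.drop_eq_nil_of_le
          simp
          omega
        rw [h1, h3, pvGoB]
        simp
      · -- full chunk of 10: offsets agree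
        have h2 : ((cs.drop i.toNat).take 10).length = 10 := by
          simp; omega
        have h3 : (cs.drop i.toNat).drop 10 = cs.drop ((i + 10).toNat) := by
          rw [List.drop_drop]
          congr 1
          omega
        rw [h2, h3, ih cs (i + 10) (by omega) (by omega)]
        norm_num

-- ===== VERDICT (by name: the statement is the Claim_ definition above) =====
theorem highlight_sequence_spec : Claim_equal_highlight_sequence := by
  intro s _
  unfold Spec_highlight_sequence highlight_sequence highlight_sequence_alt
  simp only []
  have h := PySem.List.foldl_pyRange_zero_pyGetD
    (xs := (PySem.List.pyRange 0 (PySem.Str.len s) 10).map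
      (fun i => PySem.Str.slice s (some i) (some (i + 10))))
    (d := "")
    (f := fun (st : List (String × Int × Int) × Int) (c : String) =>
      (st.1 ++ [(c, st.2, PySem.Str.len c)], st.2 + PySem.Str.len c))
    (init := (([] : List (String × Int × Int)), (0 : Int)))
  simp only [] at h
  rw [h, pvFoldA_emit]
  simp only [List.nil_append]
  have hsplit : (PySem.List.pyRange 0 (PySem.Str.len s) 10).map
      (fun i => PySem.Str.slice s (some i) (some (i + 10))) = pvSplitsOf s.toList := by
    unfold pvSplitsOf
    simp [PySem.Str.len_eq, PySem.Str.slice, PySem.Chars.slice_eq_listSlice]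
  rw [hsplit]
  rw [pvLoopB_goB s.toList.length s.toList 0 le_rfl (by simp)]
  simp only [Int.toNat_zero, List.drop_zero]
  exact pvEmit_splits s.toList.length s.toList le_rfl 0
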